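-- pv_equiv track=rewrite | github.com/YaserMarey/algos_catalog | dynamic_programming/count_coin_change_sets.py | CCS_
-- ===== SOURCE A (Python) =====
-- def CCS_(C, Total):
--     # Ini
--     T = [[0 for j in range(Total + 1)] for i in range(len(C) + 1)]
--
--     # Base case
--     # sum = 0 means empty set, and we assume that we can not achieve empty set
--     for i in range(0, len(C)): T[i][0] = 0
--
--     n = len(C)
--     C = [0] + C
--
--     # process all subsets for all sub-totals
--     for i in range(1, n + 1):
--         for t in range(1, Total + 1):
--             # Include the coin, if it does not exceed the total
--             if C[i] <= t:
--                 T[i][t] = max(T[i - 1][t], T[i][t - C[i]] + 1)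
--     # the bottom-right corner will the answer.
--     return T[n][Total]
-- ===== SOURCE B (Python) =====
-- def CCS_(C, Total):
--     # Top-down, demand-driven: an explicit work stack of (phase, i, t) frames
--     # replaces A's bottom-up table; only the cells actually reachable from
--     # (len(C), Total) are ever computed, memoized in a dict.
--     n = len(C)
--     memo = {}
--     stack = [(0, n, Total)]          # phase 0 = visit, phase 1 = combine
--     while stack:
--         ph, i, t = stack.pop()
--         if ph == 1:
--             memo[(i, t)] = max(memo[(i - 1, t)], memo[(i, t - C[i - 1])] + 1)
--         elif (i, t) in memo:
--             pass
--         elif i == 0 or t == 0 or C[i - 1] > t: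
--             memo[(i, t)] = 0
--         else:
--             stack.append((1, i, t))
--             stack.append((0, i - 1, t))
--             stack.append((0, i, t - C[i - 1]))
--     return memo[(n, Total)]
-- ===== Notes on version B (the rewrite author's own statement) =====
-- stated objective: alternative
-- what changed: Replaces A's bottom-up table fill with top-down demand-driven memoization run by an explicit work stack of visit/combine frames: only the cells reachable from (len(C), Total) are computed, stored in a dict keyed by (i, t).
-- outside the precondition, e.g. on CCS_([0], 1): A returns 1, B does not finish within the time limit
import Mathlib
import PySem

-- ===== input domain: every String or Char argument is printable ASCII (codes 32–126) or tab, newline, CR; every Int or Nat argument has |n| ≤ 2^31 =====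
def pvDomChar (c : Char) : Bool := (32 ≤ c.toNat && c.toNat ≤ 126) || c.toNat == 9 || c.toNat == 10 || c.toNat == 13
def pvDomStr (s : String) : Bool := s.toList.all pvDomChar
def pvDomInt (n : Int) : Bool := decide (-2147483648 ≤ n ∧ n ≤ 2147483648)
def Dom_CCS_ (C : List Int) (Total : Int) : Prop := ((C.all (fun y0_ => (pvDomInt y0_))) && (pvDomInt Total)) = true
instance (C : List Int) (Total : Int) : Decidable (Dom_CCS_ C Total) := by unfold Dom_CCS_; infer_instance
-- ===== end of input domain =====

-- B replaces A's bottom-up table fill with top-down, demand-driven memoization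
-- driven by an explicit work stack of visit/combine frames; alternative
-- algorithm (only reachable cells are computed), not claimed faster.


-- ===== PORT A =====
-- T[i][t] read / write (total forms; indices are in range on Pre_)
def tget (T : List (List Int)) (i t : Int) : Int :=
  PySem.List.pyGetD (PySem.List.pyGetD T i []) t 0

def tset (T : List (List Int)) (i t : Int) (v : Int) : List (List Int) :=
  PySem.List.pySetD T i (PySem.List.pySetD (PySem.List.pyGetD T i []) t v)

def CCS_ (C : List Int) (Total : Int) : Int :=
  -- T = [[0 for j in range(Total+1)] for i in range(len(C)+1)]
  let T : List (List Int) :=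
    (PySem.List.pyRange 0 ((C.length : Int) + 1) 1).map
      (fun _ => (PySem.List.pyRange 0 (Total + 1) 1).map (fun _ => (0 : Int)))
  -- for i in range(0, len(C)): T[i][0] = 0
  let T := (PySem.List.pyRange 0 (C.length : Int) 1).foldl (fun T i => tset T i 0 0) T
  let n : Int := (C.length : Int)
  -- C = [0] + C
  let C' := (0 : Int) :: C
  -- for i in range(1, n+1): for t in range(1, Total+1): ...
  let T := (PySem.List.pyRange 1 (n + 1) 1).foldl (fun T i =>
      (PySem.List.pyRange 1 (Total + 1) 1).foldl (fun T t =>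
        if PySem.List.pyGetD C' i 0 ≤ t then
          tset T i t (max (tget T (i - 1) t) (tget T i (t - PySem.List.pyGetD C' i 0) + 1))
        else T) T) T
  tget T n Total

-- ===== PORT B =====
-- frame weight for the work-stack termination measure
def wtB (e : Bool × Int × Int) : Nat :=
  (if e.1 then 1 else 2) * 5 ^ (e.2.1.toNat + e.2.2.toNat)

-- termination facts for the work stack (named lemmas, with small proof terms,
-- keep the closure of the port light)
theorem wtB_false (i t : Int) : wtB (false, i, t) = 2 * 5 ^ (i.toNat + t.toNat) := rfl

theorem wtB_true (i t : Int) : wtB (true, i, t) = 1 * 5 ^ (i.toNat + t.toNat) := rfl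

theorem wtB_pos (e : Bool × Int × Int) : 0 < wtB e := by
  obtain ⟨ph, i, t⟩ := e
  cases ph
  · rw [wtB_false]
    exact Nat.mul_pos (by decide) (Nat.pow_pos (by decide))
  · rw [wtB_true]
    exact Nat.mul_pos (by decide) (Nat.pow_pos (by decide))

theorem pvDecPop (e : Bool × Int × Int) (rest : List (Bool × Int × Int)) :
    (rest.map wtB).sum < ((e :: rest).map wtB).sum := by
  simp only [List.map_cons, List.sum_cons]
  exact Nat.lt_add_of_pos_left (wtB_pos e)

theorem pvDecExpand (ph : Bool) (i t c : Int) (rest : List (Bool × Int × Int))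
    (hph : ¬ ph = true) (h : 1 ≤ i ∧ 1 ≤ c) (hbase : ¬ (i = 0 ∨ t = 0 ∨ c > t)) :
    (((false, i, t - c) :: (false, i - 1, t) :: (true, i, t) :: rest).map wtB).sum
      < (((ph, i, t) :: rest).map wtB).sum := by
  obtain ⟨h1i, h1c⟩ := h
  have hphf : ph = false := by
    cases ph
    · rfl
    · exact absurd rfl hph
  subst hphf
  have hct : c ≤ t := by
    by_contra hgt
    exact hbase (Or.inr (Or.inr (lt_of_not_ge hgt)))
  have h1t : 1 ≤ t := le_trans h1c hct
  -- i.toNat and t.toNat step down by one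
  have hA : i.toNat = (i - 1).toNat + 1 := by
    have e0 : ((i - 1).toNat : Int) = i - 1 := Int.toNat_of_nonneg (Int.sub_nonneg.mpr h1i)
    have e2 : i = (((i - 1).toNat + 1 : Nat) : Int) := by
      rw [Nat.cast_add, Nat.cast_one, e0, Int.sub_add_cancel]
    conv_lhs => rw [e2]
    rw [Int.toNat_natCast]
  have hB : t.toNat = (t - 1).toNat + 1 := by
    have e0 : ((t - 1).toNat : Int) = t - 1 := Int.toNat_of_nonneg (Int.sub_nonneg.mpr h1t)
    have e2 : t = (((t - 1).toNat + 1 : Nat) : Int) := by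
      rw [Nat.cast_add, Nat.cast_one, e0, Int.sub_add_cancel]
    conv_lhs => rw [e2]
    rw [Int.toNat_natCast]
  have hd : (t - c).toNat ≤ (t - 1).toNat :=
    Int.toNat_le_toNat (by exact sub_le_sub_left h1c t)
  have hexp : i.toNat + (t - c).toNat ≤ (i - 1).toNat + t.toNat := by
    rw [hA, hB, Nat.add_assoc]
    exact Nat.add_le_add_left (by rw [Nat.add_comm]; exact Nat.succ_le_succ hd) _
  have hw1 : (5 : Nat) ^ (i.toNat + (t - c).toNat) ≤ 5 ^ ((i - 1).toNat + t.toNat) :=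
    Nat.pow_le_pow_right (by decide) hexp
  have hp : 0 < (5 : Nat) ^ ((i - 1).toNat + t.toNat) := Nat.pow_pos (by decide)
  have eq3 : i.toNat + t.toNat = ((i - 1).toNat + t.toNat) + 1 := by
    rw [hA, Nat.add_right_comm]
  simp only [List.map_cons, List.sum_cons, wtB_false, wtB_true]
  rw [eq3, pow_succ]
  omega

-- the while-loop of Source B: pop a frame, handle its four cases; frames are
-- (phase, i, t) with phase false = visit, true = combine
def loopB (C : List Int) (memo : PySem.Dict (Int × Int) Int)
    (stack : List (Bool × Int × Int)) : PySem.Dict (Int × Int) Int :=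
  match stack with
  | [] => memo
  | (ph, i, t) :: rest =>
    if ph then
      -- memo[(i,t)] = max(memo[(i-1,t)], memo[(i,t-C[i-1])] + 1)
      -- (both keys are present whenever this frame is reached from Pre_ input)
      loopB C (memo.insert (i, t) (max (memo.getD (i - 1, t) 0)
        (memo.getD (i, t - PySem.List.pyGetD C (i - 1) 0) 0 + 1))) rest
    else if memo.contains (i, t) then
      loopB C memo rest
    else if i = 0 ∨ t = 0 ∨ PySem.List.pyGetD C (i - 1) 0 > t then
      loopB C (memo.insert (i, t) 0) rest
    else if h : 1 ≤ i ∧ 1 ≤ PySem.List.pyGetD C (i - 1) 0 then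
      -- totality guard: holds in every state reachable from a Pre_ input
      loopB C memo ((false, i, t - PySem.List.pyGetD C (i - 1) 0) ::
        (false, i - 1, t) :: (true, i, t) :: rest)
    else loopB C (memo.insert (i, t) 0) rest
termination_by (stack.map wtB).sum
decreasing_by
  · exact pvDecPop _ _
  · exact pvDecPop _ _
  · exact pvDecPop _ _
  · rename_i hph hmem hbase
    exact pvDecExpand ph i t _ rest hph h hbase
  · exact pvDecPop _ _

def CCS__alt (C : List Int) (Total : Int) : Int :=
  -- n = len(C); memo = {}; stack = [(0, n, Total)]; while stack: ...
  let n : Int := (C.length : Int)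
  let memo := loopB C PySem.Dict.empty [(false, n, Total)]
  -- return memo[(n, Total)]  (the key is present whenever the Python B returns)
  memo.getD (n, Total) 0

-- ===== PRECONDITION & SPEC =====
-- Pre_ excludes inputs where A raises (negative Total; a negative coin with Total ≥ 1)
-- and the zero-coin corner with Total ≥ 1, where A's value comes from reading the cell
-- being written before it is written (an artefact) and B itself diverges.
def Pre_CCS_ (C : List Int) (Total : Int) : Prop :=
  0 ≤ Total ∧ (Total = 0 ∨ ∀ c ∈ C, 1 ≤ c)
instance (C : List Int) (Total : Int) : Decidable (Pre_CCS_ C Total) := by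
  unfold Pre_CCS_; infer_instance

def pvWitness_CCS_ : List Int × Int := ([1, 2, 3], 5)

def Spec_CCS_ (C : List Int) (Total : Int) (out : Int) : Prop := out = CCS__alt C Total
instance (C : List Int) (Total : Int) (out : Int) : Decidable (Spec_CCS_ C Total out) := by unfold Spec_CCS_; infer_instance

-- ===== CLAIM (what is proved, stated in full; the proofs are below) =====
def Claim_equal_CCS_ : Prop := ∀ (C : List Int) (Total : Int), Dom_CCS_ C Total → Pre_CCS_ C Total → Spec_CCS_ C Total (CCS_ C Total)

-- ===== LEMMAS AND PROOFS =====

-- the table's cell value as a pure recursion (meeting point of the two proofs)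
def cellF (P : List Int) (c : Int) (t : Nat) : Int :=
  if h : 1 ≤ c ∧ 1 ≤ t ∧ c ≤ (t : Int) then
    max (P.getD t 0) (cellF P c (t - c.toNat) + 1)
  else 0
decreasing_by
  have h2 : 1 ≤ c.toNat := by omega
  omega

def rowF (P : List Int) (c : Int) (N : Nat) : List Int :=
  (List.range (N + 1)).map (cellF P c)

def rowsK (C : List Int) (N : Nat) : List Int :=
  C.foldl (fun P c => rowF P c N) (List.replicate (N + 1) (0 : Int))

theorem cellF_zero (P : List Int) (c : Int) (t : Nat)
    (h : ¬ (1 ≤ c ∧ 1 ≤ t ∧ c ≤ (t : Int))) : cellF P c t = 0 := by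
  rw [cellF]; simp [h]

theorem cellF_pos (P : List Int) (c : Int) (t : Nat)
    (h : 1 ≤ c ∧ 1 ≤ t ∧ c ≤ (t : Int)) :
    cellF P c t = max (P.getD t 0) (cellF P c (t - c.toNat) + 1) := by
  rw [cellF]; simp [h]

-- row j of the table after processing the first k coins
def rowsK' (C : List Int) (N k : Nat) : List Int :=
  rowsK (C.take k) N

def partRow (P : List Int) (c : Int) (N j : Nat) : List Int :=
  (List.range (N + 1)).map (fun t => if t ≤ j then cellF P c t else 0)

theorem foldl_fixed {α β : Type} (f : β → α → β) (l : List α) (a : β)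
    (h : ∀ x ∈ l, f a x = a) : l.foldl f a = a := by
  induction l with
  | nil => rfl
  | cons x xs ih =>
    rw [List.foldl_cons, h x (by simp)]
    exact ih (fun y hy => h y (by simp [hy]))

-- list indexing helpers
theorem getD_append_cons {α : Type} (Pre : List α) (r : α) (Post : List α) (d : α) :
    (Pre ++ r :: Post).getD Pre.length d = r := by
  rw [List.getD_eq_getElem?_getD, List.getElem?_append_right (Nat.le_refl _)]
  simp

theorem set_append_cons {α : Type} (Pre : List α) (r v : α) (Post : List α) :
    (Pre ++ r :: Post).set Pre.length v = Pre ++ v :: Post := by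
  rw [List.set_append]
  simp

theorem partRow_zero (P : List Int) (c : Int) (N : Nat) :
    List.replicate (N + 1) (0 : Int) = partRow P c N 0 := by
  apply List.ext_getElem (by simp [partRow])
  intro i h1 h2
  simp only [partRow, List.getElem_replicate, List.getElem_map, List.getElem_range]
  by_cases hi : i ≤ 0
  · have hi0 : i = 0 := by omega
    subst hi0
    rw [if_pos (by omega), cellF_zero P c 0 (by rintro ⟨-, h, -⟩; omega)]
  · rw [if_neg hi]

theorem partRow_last (P : List Int) (c : Int) (N : Nat) : partRow P c N N = rowF P c N := by
  unfold partRow rowF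
  apply List.map_congr_left
  intro t htm
  rw [if_pos (by have := List.mem_range.mp htm; omega)]

theorem partRow_set (P : List Int) (c : Int) (N j : Nat) (_hj : j < N) :
    (partRow P c N j).set (j + 1) (cellF P c (j + 1)) = partRow P c N (j + 1) := by
  apply List.ext_getElem (by simp [partRow])
  intro i h1 h2
  rw [List.getElem_set]
  simp only [partRow, List.getElem_map, List.getElem_range]
  by_cases hij : j + 1 = i
  · subst hij
    rw [if_pos rfl, if_pos (by omega)]
  · rw [if_neg hij]
    by_cases hij2 : i ≤ j
    · rw [if_pos hij2, if_pos (by omega)]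
    · rw [if_neg hij2, if_neg (by omega)]

theorem partRow_skip (P : List Int) (c : Int) (N j : Nat)
    (hct : ¬ c ≤ ((j + 1 : Nat) : Int)) :
    partRow P c N j = partRow P c N (j + 1) := by
  apply List.ext_getElem (by simp [partRow])
  intro i h1 h2
  simp only [partRow, List.getElem_map, List.getElem_range]
  by_cases hij : i ≤ j
  · rw [if_pos hij, if_pos (by omega)]
  · rw [if_neg hij]
    by_cases hij2 : i ≤ j + 1
    · rw [if_pos hij2]
      have hi : i = j + 1 := by omega
      subst hi
      rw [cellF_zero P c (j + 1) (by rintro ⟨-, -, h⟩; exact hct (by exact_mod_cast h))]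
    · rw [if_neg hij2]

theorem fold_build {β : Type} (F : β → Nat → β) (R : Nat → β) (init : β) (N : Nat)
    (h0 : init = R 0) (hstep : ∀ j, j < N → F (R j) j = R (j + 1)) :
    (List.range N).foldl F init = R N := by
  suffices h : ∀ j, j ≤ N → (List.range j).foldl F init = R j from h N (Nat.le_refl N)
  intro j
  induction j with
  | zero => intro _; simpa using h0
  | succ j ih =>
    intro hj
    rw [List.range_succ, List.foldl_append, List.foldl_cons, List.foldl_nil,
      ih (by omega), hstep j (by omega)]

-- A's inner loop, extracted to row level, builds exactly the rowF row
theorem innerA_eq_rowF (P : List Int) (c : Int) (N : Nat) (hc : 1 ≤ c ∨ N = 0) :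
    ((PySem.List.pyRange 1 ((N : Int) + 1) 1).foldl (fun rr t =>
      if c ≤ t then
        PySem.List.pySetD rr t
          (max (PySem.List.pyGetD P t 0) (PySem.List.pyGetD rr (t - c) 0 + 1))
      else rr) (List.replicate (N + 1) (0 : Int))) = rowF P c N := by
  rcases Nat.eq_zero_or_pos N with hN | hNpos
  · subst hN
    rw [show ((0 : Nat) : Int) + 1 = (1 : Int) by norm_num,
      PySem.List.pyRange_one_eq_nil (le_refl (1 : Int)), List.foldl_nil]
    simp [rowF, List.range_one, cellF_zero P c 0 (by rintro ⟨-, h, -⟩; omega)]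
  · have hc1 : 1 ≤ c := by
      rcases hc with h | h
      · exact h
      · omega
    have htn : ((N : Int) + 1 - 1).toNat = N := by omega
    rw [PySem.List.pyRange_one, htn, List.foldl_map, ← partRow_last P c N]
    refine fold_build _ _ _ N (partRow_zero P c N) ?_
    intro j hj
    beta_reduce
    have htj : (1 : Int) + (j : Int) = ((j + 1 : Nat) : Int) := by push_cast; ring
    simp only [htj]
    by_cases hct : c ≤ ((j + 1 : Nat) : Int)
    · rw [if_pos hct]
      have hcle : c.toNat ≤ j + 1 := by omega
      have hidx : ((j + 1 : Nat) : Int) - c = ((j + 1 - c.toNat : Nat) : Int) := by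
        rw [Nat.cast_sub hcle]
        omega
      rw [hidx, PySem.List.pyGetD_natCast P (j + 1) 0,
        PySem.List.pyGetD_natCast (partRow P c N j) (j + 1 - c.toNat) 0]
      have hval : (partRow P c N j).getD (j + 1 - c.toNat) 0
          = cellF P c (j + 1 - c.toNat) := by
        rw [List.getD_eq_getElem _ _ (by simp [partRow]; omega)]
        simp only [partRow, List.getElem_map, List.getElem_range]
        rw [if_pos (by omega)]
      rw [hval]
      have hcell : max (P.getD (j + 1) 0) (cellF P c (j + 1 - c.toNat) + 1)
          = cellF P c (j + 1) := (cellF_pos P c (j + 1) ⟨hc1, by omega, hct⟩).symm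
      rw [hcell, PySem.List.pySetD_natCast, partRow_set P c N j hj]
    · rw [if_neg hct]
      exact partRow_skip P c N j hct

-- extraction: A's inner fold on the full table only rewrites the processed row
theorem inner_extract (c : Int) (k : Nat) (Pre Post : List (List Int)) (r : List Int)
    (hlen : Pre.length = k + 1) (ts : List Int) :
    ts.foldl (fun T t =>
      if c ≤ t then
        tset T ((k : Int) + 1) t
          (max (tget T (((k : Int) + 1) - 1) t) (tget T (((k : Int) + 1)) (t - c) + 1))
      else T) (Pre ++ r :: Post)
    = Pre ++ (ts.foldl (fun rr t =>
        if c ≤ t then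
          PySem.List.pySetD rr t
            (max (PySem.List.pyGetD (Pre.getD k []) t 0) (PySem.List.pyGetD rr (t - c) 0 + 1))
        else rr) r) :: Post := by
  induction ts generalizing r with
  | nil => simp
  | cons t ts ih =>
    simp only [List.foldl_cons]
    have e0 : ((k : Int) + 1) = ((k + 1 : Nat) : Int) := by push_cast; ring
    have e1 : PySem.List.pyGetD (Pre ++ r :: Post) ((k : Int) + 1) [] = r := by
      rw [e0, PySem.List.pyGetD_natCast, ← hlen, getD_append_cons]
    have e2 : tget (Pre ++ r :: Post) (((k : Int) + 1) - 1) t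
        = PySem.List.pyGetD (Pre.getD k []) t 0 := by
      unfold tget
      have h : ((k : Int) + 1 - 1) = ((k : Nat) : Int) := by ring
      rw [h, PySem.List.pyGetD_natCast, List.getD_append _ _ _ _ (by omega)]
    have e3 : ∀ x, tget (Pre ++ r :: Post) ((k : Int) + 1) x = PySem.List.pyGetD r x 0 := by
      intro x
      unfold tget
      rw [e1]
    have e4 : ∀ v, tset (Pre ++ r :: Post) ((k : Int) + 1) t v
        = Pre ++ (PySem.List.pySetD r t v) :: Post := by
      intro v
      unfold tset
      rw [e1, e0, PySem.List.pySetD_natCast, ← hlen, set_append_cons]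
    by_cases hct : c ≤ t
    · rw [if_pos hct, if_pos hct, e2, e3, e4]
      exact ih _
    · rw [if_neg hct, if_neg hct]
      exact ih _

theorem rows_succ (C : List Int) (N k : Nat) (hk : k < C.length) :
    rowsK' C N (k + 1) = rowF (rowsK' C N k) (C.getD k 0) N := by
  unfold rowsK' rowsK
  rw [List.take_add_one, List.getElem?_eq_getElem hk]
  simp only [Option.toList_some, List.foldl_append, List.foldl_cons, List.foldl_nil]
  rw [List.getD_eq_getElem _ _ hk]

theorem preGetD (C : List Int) (N k : Nat) :
    ((List.replicate (N + 1) (0 : Int)) ::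
      (List.range k).map (fun j => rowsK' C N (j + 1))).getD k [] = rowsK' C N k := by
  cases k with
  | zero => simp [rowsK', rowsK]
  | succ k' =>
    rw [List.getD_cons_succ]
    rw [List.getD_eq_getElem _ _ (by simp)]
    simp

-- outer induction on the number of processed coins
theorem outer_table (C : List Int) (N : Nat) (hc : ∀ c ∈ C, 1 ≤ c ∨ N = 0) :
    ∀ k, k ≤ C.length →
    (PySem.List.pyRange 1 ((k : Int) + 1) 1).foldl
      (fun T i => (PySem.List.pyRange 1 ((N : Int) + 1) 1).foldl (fun T t =>
        if PySem.List.pyGetD ((0 : Int) :: C) i 0 ≤ t then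
          tset T i t (max (tget T (i - 1) t)
            (tget T i (t - PySem.List.pyGetD ((0 : Int) :: C) i 0) + 1))
        else T) T)
      (List.replicate (C.length + 1) (List.replicate (N + 1) (0 : Int)))
    = ((List.replicate (N + 1) (0 : Int)) ::
        (List.range k).map (fun j => rowsK' C N (j + 1)))
      ++ List.replicate (C.length - k) (List.replicate (N + 1) (0 : Int)) := by
  intro k
  induction k with
  | zero =>
    intro _
    rw [show ((0 : Nat) : Int) + 1 = (1 : Int) by norm_num,
      PySem.List.pyRange_one_eq_nil (le_refl (1 : Int)), List.foldl_nil]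
    simp [List.replicate_succ]
  | succ k ih =>
    intro hk
    have hk' : k < C.length := by omega
    have hcast : (((k + 1 : Nat)) : Int) + 1 = ((k : Int) + 1) + 1 := by push_cast; ring
    rw [hcast, PySem.List.pyRange_one_succ_right (a := 1) (b := (k : Int) + 1) (by omega),
      List.foldl_append, List.foldl_cons, List.foldl_nil, ih (by omega)]
    have hci : PySem.List.pyGetD ((0 : Int) :: C) ((k : Int) + 1) 0 = C.getD k 0 := by
      have h : ((k : Int) + 1) = ((k + 1 : Nat) : Int) := by push_cast; ring
      rw [h, PySem.List.pyGetD_natCast, List.getD_cons_succ]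
    simp only [hci]
    have hsplit : ((List.replicate (N + 1) (0 : Int)) ::
          (List.range k).map (fun j => rowsK' C N (j + 1)))
        ++ List.replicate (C.length - k) (List.replicate (N + 1) (0 : Int))
        = ((List.replicate (N + 1) (0 : Int)) ::
            (List.range k).map (fun j => rowsK' C N (j + 1)))
          ++ (List.replicate (N + 1) (0 : Int)) ::
            List.replicate (C.length - (k + 1)) (List.replicate (N + 1) (0 : Int)) := by
      have h : C.length - k = (C.length - (k + 1)) + 1 := by omega
      rw [h]
      simp [List.replicate_succ]
    rw [hsplit]
    rw [inner_extract (C.getD k 0) k _ _ _ (by simp) _]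
    simp only [preGetD]
    have hmem : C.getD k 0 ∈ C := by
      rw [List.getD_eq_getElem _ _ hk']
      exact List.getElem_mem hk'
    rw [innerA_eq_rowF (rowsK' C N k) (C.getD k 0) N (hc _ hmem), ← rows_succ C N k hk']
    rw [List.range_succ, List.map_append]
    simp

-- the initial table of A (after the no-op base loop) is all zeros
theorem init_table (C : List Int) (N : Nat) :
    (PySem.List.pyRange 0 ((C.length : Int)) 1).foldl (fun T i => tset T i 0 0)
      ((PySem.List.pyRange 0 ((C.length : Int) + 1) 1).map
        (fun _ => (PySem.List.pyRange 0 ((N : Int) + 1) 1).map (fun _ => (0 : Int))))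
    = List.replicate (C.length + 1) (List.replicate (N + 1) (0 : Int)) := by
  have hrow : (PySem.List.pyRange 0 ((N : Int) + 1) 1).map (fun _ => (0 : Int))
      = List.replicate (N + 1) (0 : Int) := by
    rw [List.map_const', PySem.List.length_pyRange_one]
    have h : (((N : Nat) : Int) + 1 - 0).toNat = N + 1 := by omega
    rw [h]
  have htab : (PySem.List.pyRange 0 ((C.length : Int) + 1) 1).map
      (fun _ => (PySem.List.pyRange 0 ((N : Int) + 1) 1).map (fun _ => (0 : Int)))
      = List.replicate (C.length + 1) (List.replicate (N + 1) (0 : Int)) := by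
    rw [hrow, List.map_const', PySem.List.length_pyRange_one]
    have h : (((C.length : Nat) : Int) + 1 - 0).toNat = C.length + 1 := by omega
    rw [h]
  rw [htab]
  apply foldl_fixed
  intro i hi
  have hmem := (PySem.List.mem_pyRange_one).mp hi
  have hcast : i = ((i.toNat : Nat) : Int) := by omega
  unfold tset
  rw [hcast, PySem.List.pyGetD_natCast]
  rw [List.getD_replicate _ (by omega)]
  have hz : PySem.List.pySetD (List.replicate (N + 1) (0 : Int)) 0 0
      = List.replicate (N + 1) (0 : Int) := by
    rw [show (0 : Int) = ((0 : Nat) : Int) from rfl, PySem.List.pySetD_natCast,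
      List.set_replicate_self]
  rw [hz, PySem.List.pySetD_natCast, List.set_replicate_self]

-- ===== B-side: specification value of a memo cell =====

-- the value B's recursion computes for cell (i, t), as a pure recursion
def Fspec (C : List Int) (i t : Nat) : Int :=
  if hi : i = 0 then 0
  else if ht : t = 0 then 0
  else
    let c := C.getD (i - 1) 0
    if hc : 1 ≤ c ∧ c ≤ (t : Int) then
      max (Fspec C (i - 1) t) (Fspec C i (t - c.toNat) + 1)
    else 0
termination_by (i, t)
decreasing_by
  · exact Prod.Lex.left _ _ (by omega)
  · exact Prod.Lex.right _ (by omega)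

theorem rowF_getD (P : List Int) (c : Int) (N t : Nat) (ht : t ≤ N) :
    (rowF P c N).getD t 0 = cellF P c t := by
  unfold rowF
  rw [List.getD_eq_getElem _ _ (by simpa using Nat.lt_succ_of_le ht)]
  simp

-- Fspec agrees with the table rows of cellF
theorem Fspec_eq_cellF (C : List Int) (N i : Nat) (hi : i < C.length) :
    ∀ t, t ≤ N → (∀ u, u ≤ N → Fspec C i u = (rowsK' C N i).getD u 0) →
    Fspec C (i + 1) t = cellF (rowsK' C N i) (C.getD i 0) t := by
  intro t
  induction t using Nat.strong_induction_on with
  | _ t iht =>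
    intro htN ihrow
    rcases Nat.eq_zero_or_pos t with ht0 | htpos
    · subst ht0
      rw [Fspec, cellF_zero _ _ 0 (by rintro ⟨-, h, -⟩; omega)]
      simp
    · rw [Fspec]
      rw [dif_neg (by omega), dif_neg (by omega)]
      simp only [Nat.add_sub_cancel]
      by_cases hc : 1 ≤ C.getD i 0 ∧ C.getD i 0 ≤ (t : Int)
      · rw [dif_pos hc, cellF_pos _ _ _ ⟨hc.1, by omega, hc.2⟩]
        rw [ihrow t htN, iht (t - (C.getD i 0).toNat) (by omega) (by omega) ihrow]
      · rw [dif_neg hc, cellF_zero _ _ _ (by rintro ⟨h1, -, h2⟩; exact hc ⟨h1, h2⟩)]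

theorem Fspec_eq_row (C : List Int) (N : Nat) :
    ∀ i, i ≤ C.length → ∀ t, t ≤ N → Fspec C i t = (rowsK' C N i).getD t 0 := by
  intro i
  induction i with
  | zero =>
    intro _ t htN
    rw [Fspec]
    have : rowsK' C N 0 = List.replicate (N + 1) (0 : Int) := rfl
    rw [this, List.getD_replicate _ (by omega)]
    simp
  | succ i ih =>
    intro hi t htN
    have hi' : i < C.length := by omega
    rw [Fspec_eq_cellF C N i hi' t htN (fun u hu => ih (by omega) u hu)]
    rw [rows_succ C N i hi', rowF_getD _ _ _ _ htN]

-- the intended value of memo key (i, t)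
def VV (C : List Int) (i t : Int) : Int := Fspec C i.toNat t.toNat

-- every memoized value is the intended one
def GoodM (C : List Int) (memo : PySem.Dict (Int × Int) Int) : Prop :=
  ∀ i t v, memo.get? (i, t) = some v → v = VV C i t

-- a dependency is available: already memoized, or scheduled above on the stack
def Avail (memo : PySem.Dict (Int × Int) Int) (pre : List (Bool × Int × Int))
    (i t : Int) : Prop :=
  memo.contains (i, t) = true ∨ ∃ ph, (ph, i, t) ∈ pre

-- every frame carries a key in the valid rectangle
def KOk (C : List Int) (e : Bool × Int × Int) : Prop :=
  0 ≤ e.2.1 ∧ 0 ≤ e.2.2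

-- every combine frame has valid cell data and both dependencies available above it
def Cov (C : List Int) (memo : PySem.Dict (Int × Int) Int)
    (stack : List (Bool × Int × Int)) : Prop :=
  ∀ pre i t post, stack = pre ++ (true, i, t) :: post →
    1 ≤ i ∧ 1 ≤ t ∧ 1 ≤ PySem.List.pyGetD C (i - 1) 0 ∧
    PySem.List.pyGetD C (i - 1) 0 ≤ t ∧
    Avail memo pre (i - 1) t ∧ Avail memo pre i (t - PySem.List.pyGetD C (i - 1) 0)

theorem GoodM_insert (C : List Int) (memo : PySem.Dict (Int × Int) Int)
    (i t v : Int) (hg : GoodM C memo) (hv : v = VV C i t) :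
    GoodM C (memo.insert (i, t) v) := by
  intro a b w hw
  rw [PySem.Dict.get?_insert] at hw
  by_cases hab : (a, b) = (i, t)
  · rw [if_pos hab] at hw
    obtain ⟨rfl, rfl⟩ := Prod.mk.injEq .. ▸ hab
    cases hw
    simpa using hv
  · rw [if_neg hab] at hw
    exact hg a b w hw

theorem getD_of_goodM (C : List Int) (memo : PySem.Dict (Int × Int) Int)
    (i t : Int) (hg : GoodM C memo) (hc : memo.contains (i, t) = true) :
    memo.getD (i, t) 0 = VV C i t := by
  rw [PySem.Dict.contains_eq_isSome_get?] at hc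
  obtain ⟨v, hv⟩ := Option.isSome_iff_exists.mp hc
  rw [PySem.Dict.getD_eq_get?_getD, hv]
  exact hg i t v hv

-- VV satisfies the combine equation
theorem VV_rec (C : List Int) (i t : Int) (hi : 1 ≤ i) (ht : 1 ≤ t)
    (hc1 : 1 ≤ PySem.List.pyGetD C (i - 1) 0)
    (hct : PySem.List.pyGetD C (i - 1) 0 ≤ t) :
    VV C i t = max (VV C (i - 1) t)
      (VV C i (t - PySem.List.pyGetD C (i - 1) 0) + 1) := by
  have hidx : C.getD (i.toNat - 1) 0 = PySem.List.pyGetD C (i - 1) 0 := by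
    have h : (i - 1) = ((i.toNat - 1 : Nat) : Int) := by omega
    rw [h, PySem.List.pyGetD_natCast]
  have hcast : ((t.toNat : Nat) : Int) = t := by omega
  have e1 : (i - 1).toNat = i.toNat - 1 := by omega
  have e2 : (t - PySem.List.pyGetD C (i - 1) 0).toNat
      = t.toNat - (PySem.List.pyGetD C (i - 1) 0).toNat := by omega
  rw [VV, Fspec, dif_neg (by omega : ¬ i.toNat = 0), dif_neg (by omega : ¬ t.toNat = 0)]
  simp only [hidx]
  rw [dif_pos ⟨hc1, by rw [hcast]; exact hct⟩]
  simp only [VV, e1, e2]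

-- VV is 0 on base and quirk cells
theorem VV_zero (C : List Int) (i t : Int) (hi : 0 ≤ i) (ht : 0 ≤ t)
    (h : i = 0 ∨ t = 0 ∨ ¬ (1 ≤ PySem.List.pyGetD C (i - 1) 0 ∧
      PySem.List.pyGetD C (i - 1) 0 ≤ t)) : VV C i t = 0 := by
  rw [VV, Fspec]
  by_cases h1 : i.toNat = 0
  · rw [dif_pos h1]
  rw [dif_neg h1]
  by_cases h2 : t.toNat = 0
  · rw [dif_pos h2]
  rw [dif_neg h2]
  have hidx : C.getD (i.toNat - 1) 0 = PySem.List.pyGetD C (i - 1) 0 := by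
    have h : (i - 1) = ((i.toNat - 1 : Nat) : Int) := by omega
    rw [h, PySem.List.pyGetD_natCast]
  have hq : ¬ (1 ≤ C.getD (i.toNat - 1) 0 ∧ C.getD (i.toNat - 1) 0 ≤ ((t.toNat : Nat) : Int)) := by
    rw [hidx]
    rcases h with h | h | h
    · omega
    · omega
    · have hcast : ((t.toNat : Nat) : Int) = t := by omega
      rw [hcast]
      exact h
  rw [dif_neg hq]

theorem Avail_step (memo m' : PySem.Dict (Int × Int) Int) (e : Bool × Int × Int)
    (pre : List (Bool × Int × Int)) (a b : Int)
    (hav : Avail memo (e :: pre) a b)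
    (hcell : m'.contains (e.2.1, e.2.2) = true)
    (hmono : ∀ k, memo.contains k = true → m'.contains k = true) :
    Avail m' pre a b := by
  rcases hav with h | ⟨ph, hm⟩
  · left; exact hmono _ h
  · rcases List.mem_cons.mp hm with h | h
    · left
      cases h
      exact hcell
    · right; exact ⟨ph, h⟩

-- popping a frame whose cell is (or just got) memoized preserves the cover
theorem Cov_step (C : List Int) (memo m' : PySem.Dict (Int × Int) Int)
    (e : Bool × Int × Int) (rest : List (Bool × Int × Int))
    (hcov : Cov C memo (e :: rest))
    (hcell : m'.contains (e.2.1, e.2.2) = true)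
    (hmono : ∀ k, memo.contains k = true → m'.contains k = true) :
    Cov C m' rest := by
  intro pre i t post hsp
  obtain ⟨h1, h2, h3, h4, h5, h6⟩ := hcov (e :: pre) i t post (by rw [List.cons_append, hsp])
  exact ⟨h1, h2, h3, h4, Avail_step _ _ _ _ _ _ h5 hcell hmono,
    Avail_step _ _ _ _ _ _ h6 hcell hmono⟩

theorem contains_mono_insert (memo : PySem.Dict (Int × Int) Int) (k0 : Int × Int)
    (v : Int) (k : Int × Int) (hk : memo.contains k = true) :
    (memo.insert k0 v).contains k = true := by
  rw [PySem.Dict.contains_insert]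
  simp [hk]

-- main loop invariant: the loop keeps memo good, keeps every memoized key,
-- and memoizes the cell of every frame on the stack
theorem loopB_spec (C : List Int) (memo : PySem.Dict (Int × Int) Int)
    (stack : List (Bool × Int × Int)) :
    GoodM C memo → (∀ e ∈ stack, KOk C e) → Cov C memo stack →
    GoodM C (loopB C memo stack) ∧
    (∀ k, memo.contains k = true → (loopB C memo stack).contains k = true) ∧
    (∀ e ∈ stack, (loopB C memo stack).contains (e.2.1, e.2.2) = true) := by
  fun_induction loopB C memo stack with
  | case1 memo =>
    intro hg _ _
    exact ⟨hg, fun k hk => hk, by simp⟩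
  | case2 memo i t rest ih =>
    intro hg hk hcov
    obtain ⟨h1i, h1t, hc1, hct, hav1, hav2⟩ := hcov [] i t rest rfl
    have hd1 : memo.contains (i - 1, t) = true := by
      rcases hav1 with h | ⟨ph', h⟩
      · exact h
      · simp at h
    have hd2 : memo.contains (i, t - PySem.List.pyGetD C (i - 1) 0) = true := by
      rcases hav2 with h | ⟨ph', h⟩
      · exact h
      · simp at h
    have hval : max (memo.getD (i - 1, t) 0)
        (memo.getD (i, t - PySem.List.pyGetD C (i - 1) 0) 0 + 1) = VV C i t := by
      rw [getD_of_goodM C memo _ _ hg hd1, getD_of_goodM C memo _ _ hg hd2,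
        ← VV_rec C i t h1i h1t hc1 hct]
    obtain ⟨ihg, ihm, iha⟩ := ih (GoodM_insert C memo i t _ hg hval)
      (fun e he => hk e (List.mem_cons_of_mem _ he))
      (Cov_step C memo _ _ rest hcov (PySem.Dict.contains_insert_self memo (i, t) _)
        (contains_mono_insert memo (i, t) _))
    refine ⟨ihg, fun k hk' => ihm k (contains_mono_insert memo (i, t) _ k hk'), ?_⟩
    intro e he
    rcases List.mem_cons.mp he with rfl | he'
    · exact ihm _ (PySem.Dict.contains_insert_self _ _ _)
    · exact iha e he'
  | case3 memo ph i t rest hph hmem ih =>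
    intro hg hk hcov
    obtain ⟨ihg, ihm, iha⟩ := ih hg (fun e he => hk e (List.mem_cons_of_mem _ he))
      (Cov_step C memo _ _ rest hcov hmem (fun k hk' => hk'))
    refine ⟨ihg, ihm, ?_⟩
    intro e he
    rcases List.mem_cons.mp he with rfl | he'
    · exact ihm _ hmem
    · exact iha e he'
  | case4 memo ph i t rest hph hmem hbase ih =>
    intro hg hk hcov
    have hk0 := hk (ph, i, t) (List.mem_cons_self ..)
    have h0i : (0:Int) ≤ i := hk0.1
    have h0t : (0:Int) ≤ t := hk0.2
    have hval : (0 : Int) = VV C i t := by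
      refine (VV_zero C i t h0i h0t ?_).symm
      rcases hbase with h | h | h
      · exact Or.inl h
      · exact Or.inr (Or.inl h)
      · exact Or.inr (Or.inr (by omega))
    obtain ⟨ihg, ihm, iha⟩ := ih (GoodM_insert C memo i t _ hg hval)
      (fun e he => hk e (List.mem_cons_of_mem _ he))
      (Cov_step C memo _ _ rest hcov (PySem.Dict.contains_insert_self memo (i, t) _)
        (contains_mono_insert memo (i, t) _))
    refine ⟨ihg, fun k hk' => ihm k (contains_mono_insert memo (i, t) _ k hk'), ?_⟩
    intro e he
    rcases List.mem_cons.mp he with rfl | he'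
    · exact ihm _ (PySem.Dict.contains_insert_self _ _ _)
    · exact iha e he'
  | case5 memo ph i t rest hph hmem hbase h ih =>
    intro hg hk hcov
    have hk0 := hk (ph, i, t) (List.mem_cons_self ..)
    have h0i : (0:Int) ≤ i := hk0.1
    have h0t : (0:Int) ≤ t := hk0.2
    obtain ⟨h1i, h1c⟩ := h
    rw [not_or, not_or] at hbase
    obtain ⟨hi0, ht0, hct'⟩ := hbase
    have hct : PySem.List.pyGetD C (i - 1) 0 ≤ t := by omega
    have h1t : 1 ≤ t := by omega
    have hknew : ∀ e ∈ (false, i, t - PySem.List.pyGetD C (i - 1) 0) ::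
        (false, i - 1, t) :: (true, i, t) :: rest, KOk C e := by
      intro e he
      rcases List.mem_cons.mp he with rfl | he'
      · exact ⟨h0i, show (0:Int) ≤ t - PySem.List.pyGetD C (i - 1) 0 by omega⟩
      rcases List.mem_cons.mp he' with rfl | he''
      · exact ⟨show (0:Int) ≤ i - 1 by omega, h0t⟩
      rcases List.mem_cons.mp he'' with rfl | he'''
      · exact ⟨h0i, h0t⟩
      · exact hk e (List.mem_cons_of_mem _ he''')
    have hcovnew : Cov C memo ((false, i, t - PySem.List.pyGetD C (i - 1) 0) ::
        (false, i - 1, t) :: (true, i, t) :: rest) := by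
      intro pre a b post hsp
      rcases pre with _ | ⟨x, pre⟩
      · simp at hsp
      rcases pre with _ | ⟨y, pre⟩
      · simp at hsp
      rcases pre with _ | ⟨z, pre⟩
      · -- the new combine frame itself
        injection hsp with hx hsp
        injection hsp with hy hsp
        injection hsp with hz hsp
        injection hz with hz1 hz2
        injection hz2 with hz2 hz3
        subst hz2; subst hz3; subst hx; subst hy
        refine ⟨h1i, h1t, h1c, hct, ?_, ?_⟩
        · exact Or.inr ⟨false, by simp⟩
        · exact Or.inr ⟨false, by simp⟩
      · -- a combine frame of the old stack
        simp only [List.cons_append, List.cons.injEq] at hsp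
        obtain ⟨hx, hy, hz, hrest⟩ := hsp
        subst hx; subst hy; subst hz
        obtain ⟨g1, g2, g3, g4, g5, g6⟩ := hcov ((ph, i, t) :: pre) a b post
          (by rw [List.cons_append, hrest])
        have transfer : ∀ a' b', Avail memo ((ph, i, t) :: pre) a' b' →
            Avail memo ((false, i, t - PySem.List.pyGetD C (i - 1) 0) ::
              (false, i - 1, t) :: (true, i, t) :: pre) a' b' := by
          intro a' b' hav
          rcases hav with hh | ⟨ph', hm⟩
          · exact Or.inl hh
          · rcases List.mem_cons.mp hm with hh | hh
            · refine Or.inr ⟨true, ?_⟩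
              cases hh
              simp
            · exact Or.inr ⟨ph', by simp [hh]⟩
        exact ⟨g1, g2, g3, g4, transfer _ _ g5, transfer _ _ g6⟩
    obtain ⟨ihg, ihm, iha⟩ := ih hg hknew hcovnew
    refine ⟨ihg, ihm, ?_⟩
    intro e he
    rcases List.mem_cons.mp he with rfl | he'
    · exact iha (true, i, t) (by simp)
    · exact iha e (by simp [he'])
  | case6 memo ph i t rest hph hmem hbase h ih =>
    intro hg hk hcov
    have hk0 := hk (ph, i, t) (List.mem_cons_self ..)
    have h0i : (0:Int) ≤ i := hk0.1
    have h0t : (0:Int) ≤ t := hk0.2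
    rw [not_or, not_or] at hbase
    obtain ⟨hi0, ht0, hct'⟩ := hbase
    have hval : (0 : Int) = VV C i t := by
      refine (VV_zero C i t h0i h0t (Or.inr (Or.inr ?_))).symm
      rintro ⟨hc1, -⟩
      exact h ⟨by omega, hc1⟩
    obtain ⟨ihg, ihm, iha⟩ := ih (GoodM_insert C memo i t _ hg hval)
      (fun e he => hk e (List.mem_cons_of_mem _ he))
      (Cov_step C memo _ _ rest hcov (PySem.Dict.contains_insert_self memo (i, t) _)
        (contains_mono_insert memo (i, t) _))
    refine ⟨ihg, fun k hk' => ihm k (contains_mono_insert memo (i, t) _ k hk'), ?_⟩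
    intro e he
    rcases List.mem_cons.mp he with rfl | he'
    · exact ihm _ (PySem.Dict.contains_insert_self _ _ _)
    · exact iha e he'


-- ===== VERDICT (by name: the statement is the Claim_ definition above) =====
theorem CCS__spec : Claim_equal_CCS_ := by
  intro C Total hdom hpre
  obtain ⟨h0, hco⟩ := hpre
  unfold Spec_CCS_
  lift Total to Nat using h0 with N hN
  have hc : ∀ c ∈ C, 1 ≤ c ∨ N = 0 := by
    intro c hcm
    rcases hco with h | h
    · right; exact_mod_cast h
    · left; exact h c hcm
  have hB : CCS__alt C ((N : Nat) : Int) = (rowsK C N).getD N 0 := by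
    have hg0 : GoodM C PySem.Dict.empty := by
      intro i t v hv
      rw [PySem.Dict.get?_empty] at hv
      cases hv
    have hk0 : ∀ e ∈ [((false : Bool), ((C.length : Nat) : Int), ((N : Nat) : Int))], KOk C e := by
      intro e he
      rcases List.mem_cons.mp he with rfl | he'
      · exact ⟨Int.natCast_nonneg _, Int.natCast_nonneg _⟩
      · simp at he'
    have hc0 : Cov C PySem.Dict.empty
        [((false : Bool), ((C.length : Nat) : Int), ((N : Nat) : Int))] := by
      intro pre a b post hsp
      rcases pre with _ | ⟨x, pre⟩
      · simp at hsp
      · simp at hsp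
    obtain ⟨hgood, hmono, hall⟩ := loopB_spec C PySem.Dict.empty _ hg0 hk0 hc0
    have hcont := hall ((false : Bool), ((C.length : Nat) : Int), ((N : Nat) : Int))
      (List.mem_cons_self ..)
    have hval := getD_of_goodM C _ ((C.length : Nat) : Int) ((N : Nat) : Int) hgood hcont
    simp only [CCS__alt]
    rw [hval, VV]
    simp only [Int.toNat_natCast]
    rw [Fspec_eq_row C N C.length (le_refl _) N (le_refl _)]
    unfold rowsK'
    rw [List.take_length]
  have hA : CCS_ C ((N : Nat) : Int) = (rowsK C N).getD N 0 := by
    simp only [CCS_]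
    rw [init_table C N]
    rw [outer_table C N hc C.length (Nat.le_refl _)]
    simp only [Nat.sub_self, List.replicate_zero, List.append_nil]
    unfold tget
    rw [PySem.List.pyGetD_natCast, PySem.List.pyGetD_natCast, preGetD]
    unfold rowsK'
    rw [List.take_length]
  rw [hA, hB]
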